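-- pv_equiv track=rewrite | github.com/rakurtz/AdventOfCode2021 | day10.py | calculate_score_part2
-- ===== SOURCE A (Python) =====
-- def calculate_score_part2(syntax_completion_line: str):
--     """ calculate score of each line and return it """
--     line_score = 0
--     for character in syntax_completion_line:
--         match character:
--             case ")":
--                 line_score = (line_score * 5) + 1
--             case "]":
--                 line_score = (line_score * 5) + 2
--             case "}":
--                 line_score = (line_score * 5) + 3
--             case ">":
--                 line_score = (line_score * 5) + 4
--
--     return line_score
-- ===== SOURCE B (Python) =====
-- def calculate_score_part2(syntax_completion_line: str):
--     """ calculate score of each line and return it """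
--     values = {")": 1, "]": 2, "}": 3, ">": 4}
--     digits = [values[c] for c in syntax_completion_line if c in values]
--     n = len(digits)
--     return sum(d * 5 ** (n - 1 - i) for i, d in enumerate(digits))
-- ===== Notes on version B (the rewrite author's own statement) =====
-- stated objective: alternative
-- what changed: Replaces the iterative Horner multiply-accumulate over a char match with a collect-then-weighted-sum: map bracket chars to digits via a dict comprehension filter, then score = sum of digit * 5**(positional weight).
import Mathlib
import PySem

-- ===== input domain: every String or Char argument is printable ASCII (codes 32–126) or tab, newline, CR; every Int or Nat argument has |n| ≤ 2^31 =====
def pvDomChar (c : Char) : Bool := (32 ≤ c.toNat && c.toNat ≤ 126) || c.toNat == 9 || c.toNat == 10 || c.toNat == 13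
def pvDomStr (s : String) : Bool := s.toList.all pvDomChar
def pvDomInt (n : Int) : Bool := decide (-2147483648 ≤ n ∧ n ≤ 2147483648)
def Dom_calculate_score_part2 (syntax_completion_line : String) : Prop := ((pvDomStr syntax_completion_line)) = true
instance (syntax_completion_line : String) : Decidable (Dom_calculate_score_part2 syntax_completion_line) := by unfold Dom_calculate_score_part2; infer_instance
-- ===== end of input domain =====

-- B replaces A's Horner multiply-accumulate loop by collecting the digits and taking a
-- positional base-5 weighted sum (objective: alternative decomposition, same cost).

-- ===== PORT A =====
-- the match on `character` becomes an if-chain in the same case order; unmatched chars fall through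
def calculate_score_part2 (syntax_completion_line : String) : Int :=
  syntax_completion_line.toList.foldl (fun line_score character =>
    if character = ')' then line_score * 5 + 1
    else if character = ']' then line_score * 5 + 2
    else if character = '}' then line_score * 5 + 3
    else if character = '>' then line_score * 5 + 4
    else line_score) 0

-- ===== PORT B =====
-- the dict lookup `values[c] if c in values` becomes an Option-valued lookup in the same key order
def pvVal? (c : Char) : Option Int :=
  if c = ')' then some 1
  else if c = ']' then some 2
  else if c = '}' then some 3
  else if c = '>' then some 4
  else none

-- Python's 5 ** (n - 1 - i) always has a nonnegative exponent (i < n), so `.toNat` is exact here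
def calculate_score_part2_alt (syntax_completion_line : String) : Int :=
  let digits := syntax_completion_line.toList.filterMap pvVal?
  let n : Int := digits.length
  ((PySem.List.enumerate digits 0).map (fun p => p.2 * 5 ^ ((n - 1 - p.1).toNat))).sum

-- ===== PRECONDITION & SPEC =====
def Spec_calculate_score_part2 (syntax_completion_line : String) (out : Int) : Prop := out = calculate_score_part2_alt syntax_completion_line
instance (syntax_completion_line : String) (out : Int) : Decidable (Spec_calculate_score_part2 syntax_completion_line out) := by unfold Spec_calculate_score_part2; infer_instance

-- ===== CLAIM (what is proved, stated in full; the proofs are below) =====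
def Claim_equal_calculate_score_part2 : Prop := ∀ (syntax_completion_line : String), Dom_calculate_score_part2 syntax_completion_line → Spec_calculate_score_part2 syntax_completion_line (calculate_score_part2 syntax_completion_line)

-- ===== LEMMAS AND PROOFS =====

-- A's loop equals a Horner fold over the digit list extracted by pvVal?
theorem foldA_eq_horner (l : List Char) (acc : Int) :
    l.foldl (fun line_score character =>
      if character = ')' then line_score * 5 + 1
      else if character = ']' then line_score * 5 + 2
      else if character = '}' then line_score * 5 + 3
      else if character = '>' then line_score * 5 + 4
      else line_score) acc
      = (l.filterMap pvVal?).foldl (fun a d => a * 5 + d) acc := by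
  induction l generalizing acc with
  | nil => rfl
  | cons c t ih =>
    simp only [List.foldl_cons, List.filterMap_cons, pvVal?]
    split_ifs <;> simp only [List.foldl_cons] <;> rw [ih] <;> rfl

-- Horner fold = weighted positional sum, generalized over the enumerate start index
theorem horner_eq_wsum (ds : List Int) (s acc : Int) :
    ds.foldl (fun a d => a * 5 + d) acc
      = acc * 5 ^ ds.length
        + ((PySem.List.enumerate ds s).map
            (fun p => p.2 * 5 ^ ((s + (ds.length : Int) - 1 - p.1).toNat))).sum := by
  induction ds generalizing s acc with
  | nil => simp
  | cons d t ih =>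
    rw [List.foldl_cons, ih (s + 1) (acc * 5 + d)]
    simp only [PySem.List.enumerate_cons, List.map_cons, List.sum_cons, List.length_cons]
    have h1 : (s + ((t.length : Int) + 1) - 1 - s).toNat = t.length := by omega
    have h2 : ∀ p : Int × Int,
        (s + 1 + (t.length : Int) - 1 - p.1).toNat = (s + ((t.length : Int) + 1) - 1 - p.1).toNat := by
      intro p; omega
    push_cast
    rw [h1]
    have h3 : ((PySem.List.enumerate t (s + 1)).map
          (fun p => p.2 * 5 ^ ((s + 1 + (t.length : Int) - 1 - p.1).toNat))).sum
        = ((PySem.List.enumerate t (s + 1)).map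
          (fun p => p.2 * 5 ^ ((s + ((t.length : Int) + 1) - 1 - p.1).toNat))).sum := by
      congr 1; exact List.map_congr_left (fun p _ => by rw [h2 p])
    rw [h3]; ring

-- ===== VERDICT (by name: the statement is the Claim_ definition above) =====
theorem calculate_score_part2_spec : Claim_equal_calculate_score_part2 := by
  intro s _
  unfold Spec_calculate_score_part2 calculate_score_part2 calculate_score_part2_alt
  rw [foldA_eq_horner, horner_eq_wsum (s := 0)]
  simp
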